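-- pv_equiv track=rewrite | github.com/Redwoods87/CS167 | bagels.py | validInput
-- ===== SOURCE A (Python) =====
-- def validInput(text):
--     """
--     Checks if text is exactly three distinct digits
--     Parameter:
--         digits: a string to be checked
--     Returns True if text is valid and False if not
--     """
--     checkRepeats = ""
--     for i in range(len(text)):
--         if text[i] not in "0123456789":  # if char not digit, return False
--                 return False
--         if text[i] in checkRepeats:      # if digit repeated, return False
--                 return False
--         checkRepeats += text[i]
--     return len(text) == 3   # if len 3, return True
-- ===== SOURCE B (Python) =====
-- def validInput(text):
--     s = set(text)
--     return len(text) == 3 and len(s) == 3 and s.issubset("0123456789")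
-- ===== Notes on version B (the rewrite author's own statement) =====
-- stated objective: simpler
-- what changed: Replaced A's char-by-char early-return scan with a growing repeats accumulator by one-shot whole-collection set operations: build set(text) once, then compare len(text) and set size to 3 and test the set is a subset of the ten digit characters.
import Mathlib
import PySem

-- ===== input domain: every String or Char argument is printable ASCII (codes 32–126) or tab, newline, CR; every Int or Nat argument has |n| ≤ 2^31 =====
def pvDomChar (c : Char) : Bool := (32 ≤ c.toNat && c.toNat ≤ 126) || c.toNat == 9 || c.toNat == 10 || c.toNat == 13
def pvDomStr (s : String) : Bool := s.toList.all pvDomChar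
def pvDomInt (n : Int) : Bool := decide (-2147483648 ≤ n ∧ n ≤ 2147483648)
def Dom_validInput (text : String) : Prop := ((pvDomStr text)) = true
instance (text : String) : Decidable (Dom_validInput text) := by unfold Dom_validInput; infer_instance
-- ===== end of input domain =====

-- B replaces A's char-by-char early-return scan (with a growing repeats string) by
-- whole-collection set operations: build set(text) once, compare sizes, test subset of "0123456789".

-- ===== PORT A =====
-- the literal "0123456789"
def pvDigits : List Char := "0123456789".toList

-- A's loop: for i in range(len(text)), walking the characters in order and carrying
-- checkRepeats (a char list, appended on the right like `checkRepeats += text[i]`);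
-- n is len(text), used only by the final `return len(text) == 3`
def validInputGo (n : Nat) : List Char → List Char → Bool
  | [], _ => n == 3
  | c :: cs, acc =>
    if !(pvDigits.contains c) then false
    else if acc.contains c then false
    else validInputGo n cs (acc ++ [c])

def validInput (text : String) : Bool :=
  validInputGo text.toList.length text.toList []

-- ===== PORT B =====
def validInput_alt (text : String) : Bool :=
  let s : PySem.Set Char := PySem.Set.ofList text.toList
  text.toList.length == 3 && PySem.Set.len s == 3 && PySem.Set.issubset s pvDigits

-- ===== PRECONDITION & SPEC =====
def Spec_validInput (text : String) (out : Bool) : Prop := out = validInput_alt text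
instance (text : String) (out : Bool) : Decidable (Spec_validInput text out) := by unfold Spec_validInput; infer_instance

-- ===== CLAIM (what is proved, stated in full; the proofs are below) =====
def Claim_equal_validInput : Prop := ∀ (text : String), Dom_validInput text → Spec_validInput text (validInput text)

-- ===== LEMMAS AND PROOFS =====

-- characterisation of A's loop: it succeeds iff every char is a digit, none repeats
-- (within the list or against the accumulator), and len(text) == 3
theorem validInputGo_iff (n : Nat) (cs : List Char) (acc : List Char) :
    validInputGo n cs acc = true ↔
      ((∀ c ∈ cs, c ∈ pvDigits) ∧ cs.Nodup ∧ (∀ c ∈ cs, c ∉ acc) ∧ n = 3) := by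
  induction cs generalizing acc with
  | nil => simp [validInputGo]
  | cons c cs ih =>
    simp only [validInputGo, List.contains_eq_mem]
    by_cases hd : c ∈ pvDigits
    · by_cases ha : c ∈ acc
      · simp only [hd, ha, decide_true, Bool.not_true, Bool.false_eq_true, if_true, if_false]
        simp only [false_iff]
        rintro ⟨-, -, h3, -⟩
        exact (h3 c (by simp)) ha
      · simp only [hd, ha, decide_true, decide_false, Bool.not_true, Bool.false_eq_true, if_false]
        rw [ih]
        simp only [List.mem_cons, List.nodup_cons, List.mem_append,
          List.not_mem_nil, or_false]
        constructor
        · rintro ⟨h1, h2, h3, h4⟩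
          refine ⟨?_, ⟨fun hc => (h3 c hc) (Or.inr rfl), h2⟩, ?_, h4⟩
          · rintro x (rfl | hx)
            · exact hd
            · exact h1 x hx
          · rintro x (rfl | hx)
            · exact ha
            · exact fun hm => (h3 x hx) (Or.inl hm)
        · rintro ⟨h1, ⟨hcn, h2⟩, h3, h4⟩
          refine ⟨fun x hx => h1 x (Or.inr hx), h2, ?_, h4⟩
          rintro x hx (hm | rfl)
          · exact (h3 x (Or.inr hx)) hm
          · exact hcn hx
    · simp only [hd, decide_false, Bool.not_false, if_true, Bool.false_eq_true, false_iff]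
      rintro ⟨h1, -, -, -⟩
      exact hd (h1 c (by simp))

-- set(l) keeps a sub-list of l's elements, in order
theorem ofList_sublist {α : Type} [DecidableEq α] (l : List α) :
    (PySem.Set.ofList l).Sublist l := by
  induction l with
  | nil => simp [PySem.Set.ofList_nil]
  | cons x xs ih =>
    rw [PySem.Set.ofList_cons]
    exact List.Sublist.cons₂ x (List.Sublist.trans (by simp [PySem.Set.discard]) ih)

-- characterisation of B
theorem validInput_alt_iff (text : String) :
    validInput_alt text = true ↔
      (text.toList.length = 3 ∧ (PySem.Set.ofList text.toList).length = 3 ∧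
        ∀ c ∈ text.toList, c ∈ pvDigits) := by
  simp only [validInput_alt, Bool.and_eq_true, beq_iff_eq, PySem.Set.issubset_iff, PySem.Set.len]
  constructor
  · rintro ⟨⟨h1, h2⟩, h3⟩
    exact ⟨by exact_mod_cast h1, by exact_mod_cast h2,
      fun c hc => h3 c (by simpa [PySem.Set.mem_ofList] using hc)⟩
  · rintro ⟨h1, h2, h3⟩
    exact ⟨⟨by exact_mod_cast h1, by exact_mod_cast h2⟩,
      fun c hc => h3 c (by simpa [PySem.Set.mem_ofList] using hc)⟩

-- ===== VERDICT (by name: the statement is the Claim_ definition above) =====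
theorem validInput_spec : Claim_equal_validInput := by
  intro text _
  unfold Spec_validInput
  rw [Bool.eq_iff_iff]
  unfold validInput
  rw [validInputGo_iff, validInput_alt_iff]
  constructor
  · rintro ⟨h1, h2, -, h4⟩
    rw [PySem.Set.ofList_eq_self_of_nodup _ h2]
    exact ⟨h4, h4, h1⟩
  · rintro ⟨h1, h2, h3⟩
    have hnd : text.toList.Nodup := by
      have heq : PySem.Set.ofList text.toList = text.toList :=
        (ofList_sublist text.toList).eq_of_length (by rw [h2, h1])
      rw [← heq]; exact PySem.Set.nodup_ofList _
    exact ⟨h3, hnd, fun c _ h => (List.not_mem_nil h), h1⟩
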